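-- pv_equiv track=rewrite | github.com/aditya-ramabadran/formal-islands | src/formal_islands/extraction/pipeline.py | _extract_inline_math_blocks
-- ===== SOURCE A (Python) =====
-- def _extract_inline_math_blocks(text: str) -> list[str]:
--     blocks: list[str] = []
--     start = 0
--     while True:
--         open_index = text.find("\\(", start)
--         if open_index == -1:
--             return blocks
--         close_index = text.find("\\)", open_index + 2)
--         if close_index == -1:
--             return blocks
--         blocks.append(text[open_index + 2 : close_index])
--         start = close_index + 2
-- ===== SOURCE B (Python) =====
-- def _extract_inline_math_blocks(text: str) -> list[str]:
--     # Single left-to-right character scan with an explicit inside/outside state,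
--     # instead of repeated str.find calls with a moving start pointer.
--     blocks: list[str] = []
--     inside = False
--     acc: list[str] = []
--     i = 0
--     n = len(text)
--     while i < n:
--         ch = text[i]
--         if not inside:
--             if ch == '\\' and i + 1 < n and text[i + 1] == '(':
--                 inside = True
--                 acc = []
--                 i += 2
--             else:
--                 i += 1
--         else:
--             if ch == '\\' and i + 1 < n and text[i + 1] == ')':
--                 blocks.append(''.join(acc))
--                 inside = False
--                 i += 2
--             else:
--                 acc.append(ch)
--                 i += 1
--     return blocks
-- ===== Notes on version B (the rewrite author's own statement) =====
-- stated objective: alternative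
-- what changed: Replaced A's while-loop of repeated str.find calls with a moving start pointer by a single character-by-character scan with an explicit inside/outside state machine that accumulates the current block's characters.
import Mathlib
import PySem

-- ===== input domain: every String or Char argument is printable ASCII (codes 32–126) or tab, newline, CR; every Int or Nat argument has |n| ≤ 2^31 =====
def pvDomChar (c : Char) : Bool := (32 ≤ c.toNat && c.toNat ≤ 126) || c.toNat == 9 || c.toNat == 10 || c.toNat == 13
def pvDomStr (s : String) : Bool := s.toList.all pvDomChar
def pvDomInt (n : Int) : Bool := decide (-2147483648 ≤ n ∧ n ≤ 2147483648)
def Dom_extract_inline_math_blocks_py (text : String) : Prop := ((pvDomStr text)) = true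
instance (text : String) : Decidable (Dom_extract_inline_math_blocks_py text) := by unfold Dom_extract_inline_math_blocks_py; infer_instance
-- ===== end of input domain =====

-- B replaces A's repeated str.find scans with a single character-by-character
-- state-machine pass (alternative decomposition; same asymptotic cost).

-- ===== PORT A =====
-- needed by pvALoop's decreasing_by: findFrom with a start past the length is -1
theorem pvFindFrom_past (s sub : List Char) (k : Int) (h : (s.length : Int) < k) :
    PySem.Chars.findFrom s sub k none = -1 := by
  simp only [PySem.Chars.findFrom]
  split_ifs with h1 h2 h3 <;> first | rfl | omega

def pvALoop (text : List Char) (blocks : List String) (start : Nat) : List String :=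
  let openIdx := PySem.Chars.findFrom text ['\\', '('] (start : Int) none
  if h1 : openIdx = -1 then blocks
  else
    let closeIdx := PySem.Chars.findFrom text ['\\', ')'] (openIdx + 2) none
    if h2 : closeIdx = -1 then blocks
    else
      pvALoop text
        (blocks ++ [String.ofList (PySem.List.slice text (some (openIdx + 2)) (some closeIdx))])
        ((closeIdx + 2).toNat)
termination_by text.length + 2 - start
decreasing_by
  have hoeq : openIdx = PySem.Chars.findFrom text ['\\', '('] (start : Int) none := rfl
  have hceq : closeIdx = PySem.Chars.findFrom text ['\\', ')'] (openIdx + 2) none := rfl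
  have hk : start ≤ text.length := by
    by_contra hgt
    exact h1 (pvFindFrom_past _ _ _ (by omega))
  have hspec := PySem.Chars.findFrom_natCast_spec text ['\\', '('] start hk h1
  obtain ⟨hso, hop, -⟩ := hspec
  have hlo : openIdx.toNat + 2 ≤ text.length := by
    have := hop.length_le
    simp at this
    omega
  have hk2 : ((openIdx.toNat + 2 : Nat) : Int) = openIdx + 2 := by omega
  have hspec2 := PySem.Chars.findFrom_natCast_spec text ['\\', ')'] (openIdx.toNat + 2)
    hlo (by rw [hk2]; exact h2)
  rw [hk2] at hspec2
  obtain ⟨hsc, hcl, -⟩ := hspec2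
  have _hlc : closeIdx.toNat + 2 ≤ text.length := by
    have := hcl.length_le
    simp at this
    omega
  simp only [← hoeq, ← hceq] at *
  omega

def extract_inline_math_blocks_py (text : String) : List String :=
  pvALoop text.toList [] 0

-- ===== PORT B =====
mutual
def pvBOutside : List Char → List String
  | [] => []
  | c :: rest =>
    match rest with
    | [] => pvBOutside []
    | c2 :: rest2 =>
      if c = '\\' ∧ c2 = '(' then pvBInside rest2 []
      else pvBOutside (c2 :: rest2)
termination_by s => s.length

def pvBInside : List Char → List Char → List String
  | [], _ => []
  | c :: rest, acc =>
    match rest with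
    | [] => pvBInside [] (acc ++ [c])
    | c2 :: rest2 =>
      if c = '\\' ∧ c2 = ')' then String.ofList acc :: pvBOutside rest2
      else pvBInside (c2 :: rest2) (acc ++ [c])
termination_by s _ => s.length
end

def extract_inline_math_blocks_py_alt (text : String) : List String :=
  pvBOutside text.toList

-- ===== PRECONDITION & SPEC =====
def Spec_extract_inline_math_blocks_py (text : String) (out : List String) : Prop := out = extract_inline_math_blocks_py_alt text
instance (text : String) (out : List String) : Decidable (Spec_extract_inline_math_blocks_py text out) := by unfold Spec_extract_inline_math_blocks_py; infer_instance

-- ===== CLAIM (what is proved, stated in full; the proofs are below) =====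
def Claim_equal_extract_inline_math_blocks_py : Prop := ∀ (text : String), Dom_extract_inline_math_blocks_py text → Spec_extract_inline_math_blocks_py text (extract_inline_math_blocks_py text)

-- ===== LEMMAS AND PROOFS =====

-- infix is preserved by consing on the left
theorem pvInfix_cons {t s : List Char} {c : Char} (h : t <:+: s) : t <:+: c :: s :=
  List.infix_cons h

-- B skips everything while no "\(" occurs
theorem pvBOutside_no_open : ∀ (s : List Char), ¬ ['\\', '('] <:+: s → pvBOutside s = []
  | [], _ => by simp [pvBOutside]
  | [c], _ => by simp [pvBOutside]
  | c :: c2 :: rest2, h => by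
    have hcond : ¬(c = '\\' ∧ c2 = '(') := by
      rintro ⟨rfl, rfl⟩
      exact h ⟨[], rest2, rfl⟩
    rw [pvBOutside]
    simp only [hcond, if_false]
    exact pvBOutside_no_open (c2 :: rest2) (fun hi => h (pvInfix_cons hi))

-- B drops the pending accumulator when no "\)" occurs
theorem pvBInside_no_close : ∀ (s : List Char) (acc : List Char), ¬ ['\\', ')'] <:+: s → pvBInside s acc = []
  | [], acc, _ => by simp [pvBInside]
  | [c], acc, _ => by simp [pvBInside]
  | c :: c2 :: rest2, acc, h => by
    have hcond : ¬(c = '\\' ∧ c2 = ')') := by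
      rintro ⟨rfl, rfl⟩
      exact h ⟨[], rest2, rfl⟩
    rw [pvBInside]
    simp only [hcond, if_false]
    exact pvBInside_no_close (c2 :: rest2) (acc ++ [c]) (fun hi => h (pvInfix_cons hi))

-- B's outside scan jumps to just past the FIRST occurrence of "\("
theorem pvBOutside_open : ∀ (s : List Char) (j : Nat),
    ['\\', '('] <+: s.drop j → (∀ i < j, ¬ ['\\', '('] <+: s.drop i) →
    pvBOutside s = pvBInside (s.drop (j + 2)) []
  | [], j, hp, _ => by
    have := hp.length_le
    simp at this
  | c :: rest, 0, hp, _ => by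
    simp only [List.drop_zero] at hp
    obtain ⟨t, ht⟩ := hp
    match rest, ht with
    | _ :: _, ht =>
      simp only [List.cons_append, List.nil_append, List.cons.injEq] at ht
      obtain ⟨rfl, rfl, rfl⟩ := ht
      rw [pvBOutside]
      simp
  | c :: rest, j + 1, hp, hmin => by
    have h0 := hmin 0 (Nat.succ_pos _)
    simp only [List.drop_zero] at h0
    match rest with
    | [] =>
      exfalso
      have := hp.length_le
      simp at this
    | c2 :: rest2 =>
      have hcond : ¬(c = '\\' ∧ c2 = '(') := by
        rintro ⟨rfl, rfl⟩
        exact h0 ⟨rest2, rfl⟩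
      rw [pvBOutside]
      simp only [hcond, if_false]
      have := pvBOutside_open (c2 :: rest2) j (by simpa using hp)
        (fun i hi => by simpa using hmin (i + 1) (by omega))
      simpa [List.drop_succ_cons] using this

-- B's inside scan emits the accumulator plus everything up to the FIRST "\)"
theorem pvBInside_close : ∀ (s : List Char) (j : Nat) (acc : List Char),
    ['\\', ')'] <+: s.drop j → (∀ i < j, ¬ ['\\', ')'] <+: s.drop i) →
    pvBInside s acc = String.ofList (acc ++ s.take j) :: pvBOutside (s.drop (j + 2))
  | [], j, acc, hp, _ => by
    have := hp.length_le
    simp at this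
  | c :: rest, 0, acc, hp, _ => by
    simp only [List.drop_zero] at hp
    obtain ⟨t, ht⟩ := hp
    match rest, ht with
    | _ :: _, ht =>
      simp only [List.cons_append, List.nil_append, List.cons.injEq] at ht
      obtain ⟨rfl, rfl, rfl⟩ := ht
      rw [pvBInside]
      simp
  | c :: rest, j + 1, acc, hp, hmin => by
    have h0 := hmin 0 (Nat.succ_pos _)
    simp only [List.drop_zero] at h0
    match rest with
    | [] =>
      exfalso
      have := hp.length_le
      simp at this
    | c2 :: rest2 =>
      have hcond : ¬(c = '\\' ∧ c2 = ')') := by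
        rintro ⟨rfl, rfl⟩
        exact h0 ⟨rest2, rfl⟩
      rw [pvBInside]
      simp only [hcond, if_false]
      have := pvBInside_close (c2 :: rest2) j (acc ++ [c]) (by simpa using hp)
        (fun i hi => by simpa using hmin (i + 1) (by omega))
      simpa [List.drop_succ_cons, List.take_succ_cons] using this

-- the loop of A equals B's state machine on the remaining suffix
theorem pvMain (s : List Char) : ∀ (blocks : List String) (start : Nat), start ≤ s.length →
    pvALoop s blocks start = blocks ++ pvBOutside (s.drop start) := by
  refine pvALoop.induct s
    (motive := fun blocks start => start ≤ s.length →
      pvALoop s blocks start = blocks ++ pvBOutside (s.drop start)) ?_ ?_ ?_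
  · -- open not found
    intro blocks start oI h1 hk
    have hoe : oI = PySem.Chars.findFrom s ['\\', '('] (start : Int) := rfl
    rw [hoe] at h1
    rw [pvALoop]
    rw [dif_pos h1]
    rw [PySem.Chars.findFrom_natCast s ['\\', '('] start hk] at h1
    by_cases hf : PySem.Chars.find (s.drop start) ['\\', '('] = -1
    · rw [pvBOutside_no_open _ ((PySem.Chars.find_eq_neg_one_iff _ _).mp hf)]
      simp
    · exfalso
      rw [if_neg hf] at h1
      have := PySem.Chars.neg_one_le_find (s.drop start) ['\\', '(']
      omega
  · -- open found, close not found
    intro blocks start oI h1 cI h2 hk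
    have hoe : oI = PySem.Chars.findFrom s ['\\', '('] (start : Int) := rfl
    have hce : cI = PySem.Chars.findFrom s ['\\', ')'] (oI + 2) := rfl
    rw [hce, hoe] at h2
    rw [hoe] at h1
    obtain ⟨hso, hop, homin⟩ := PySem.Chars.findFrom_natCast_spec s ['\\', '('] start hk h1
    have ho0 : 0 ≤ PySem.Chars.findFrom s ['\\', '('] (start : Int) := by omega
    have hobnd : (PySem.Chars.findFrom s ['\\', '('] (start : Int)).toNat + 2 ≤ s.length := by
      have := hop.length_le
      simp at this
      omega
    have hc2 : (((PySem.Chars.findFrom s ['\\', '('] (start : Int)).toNat + 2 : Nat) : Int)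
        = PySem.Chars.findFrom s ['\\', '('] (start : Int) + 2 := by omega
    have hBout : pvBOutside (s.drop start)
        = pvBInside (s.drop ((PySem.Chars.findFrom s ['\\', '('] (start : Int)).toNat + 2)) [] := by
      rw [pvBOutside_open (s.drop start)
        ((PySem.Chars.findFrom s ['\\', '('] (start : Int)).toNat - start) ?_ ?_]
      · rw [List.drop_drop]
        congr 2
        omega
      · rw [List.drop_drop]
        have heq : start + ((PySem.Chars.findFrom s ['\\', '('] (start : Int)).toNat - start)
            = (PySem.Chars.findFrom s ['\\', '('] (start : Int)).toNat := by omega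
        rw [heq]
        exact hop
      · intro i hi
        rw [List.drop_drop]
        exact homin (start + i) (by omega) (by omega)
    rw [pvALoop]
    rw [dif_neg h1]
    rw [dif_pos h2]
    rw [← hc2] at h2
    have hnoc := (PySem.Chars.findFrom_natCast_eq_neg_one_iff s ['\\', ')'] _ hobnd).mp h2
    rw [hBout, pvBInside_no_close _ [] hnoc]
    simp
  · -- both found: one block is produced, then the loop continues
    intro blocks start oI h1 cI h2 ih hk
    have hoe : oI = PySem.Chars.findFrom s ['\\', '('] (start : Int) := rfl
    have hce : cI = PySem.Chars.findFrom s ['\\', ')'] (oI + 2) := rfl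
    rw [hce, hoe] at h2
    rw [hoe] at h1
    rw [hce, hoe] at ih
    clear hce hoe
    clear cI oI
    obtain ⟨hso, hop, homin⟩ := PySem.Chars.findFrom_natCast_spec s ['\\', '('] start hk h1
    have ho0 : 0 ≤ PySem.Chars.findFrom s ['\\', '('] (start : Int) := by omega
    have hobnd : (PySem.Chars.findFrom s ['\\', '('] (start : Int)).toNat + 2 ≤ s.length := by
      have := hop.length_le
      simp at this
      omega
    have hc2 : (((PySem.Chars.findFrom s ['\\', '('] (start : Int)).toNat + 2 : Nat) : Int)
        = PySem.Chars.findFrom s ['\\', '('] (start : Int) + 2 := by omega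
    have hBout : pvBOutside (s.drop start)
        = pvBInside (s.drop ((PySem.Chars.findFrom s ['\\', '('] (start : Int)).toNat + 2)) [] := by
      rw [pvBOutside_open (s.drop start)
        ((PySem.Chars.findFrom s ['\\', '('] (start : Int)).toNat - start) ?_ ?_]
      · rw [List.drop_drop]
        congr 2
        omega
      · rw [List.drop_drop]
        have heq : start + ((PySem.Chars.findFrom s ['\\', '('] (start : Int)).toNat - start)
            = (PySem.Chars.findFrom s ['\\', '('] (start : Int)).toNat := by omega
        rw [heq]
        exact hop
      · intro i hi
        rw [List.drop_drop]
        exact homin (start + i) (by omega) (by omega)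
    rw [← hc2] at h2
    rw [← hc2] at ih
    rw [pvALoop]
    rw [dif_neg h1]
    rw [dif_neg (by rw [← hc2]; exact h2)]
    rw [← hc2]
    obtain ⟨hsc, hcl, hcmin⟩ := PySem.Chars.findFrom_natCast_spec s ['\\', ')'] _ hobnd h2
    -- name the two found positions to keep the arithmetic readable
    generalize hO : PySem.Chars.findFrom s ['\\', '('] (start : Int) = O at *
    generalize hC : PySem.Chars.findFrom s ['\\', ')'] (((O.toNat + 2 : Nat) : Int)) = C at *
    have hcbnd : C.toNat + 2 ≤ s.length := by
      have := hcl.length_le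
      simp at this
      omega
    have hBin : pvBInside (s.drop (O.toNat + 2)) []
        = String.ofList ((s.drop (O.toNat + 2)).take (C.toNat - (O.toNat + 2)))
          :: pvBOutside (s.drop (C.toNat + 2)) := by
      rw [pvBInside_close _ (C.toNat - (O.toNat + 2)) [] ?_ ?_]
      · rw [List.nil_append, List.drop_drop]
        congr 3
        omega
      · rw [List.drop_drop]
        have heq : O.toNat + 2 + (C.toNat - (O.toNat + 2)) = C.toNat := by omega
        rw [heq]
        exact hcl
      · intro i hi
        rw [List.drop_drop]
        exact hcmin (O.toNat + 2 + i) (by omega) (by omega)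
    rw [ih (by omega)]
    rw [PySem.List.slice_toNat s (by omega) (by omega)]
    rw [hBout, hBin]
    have htn : (C + 2).toNat = C.toNat + 2 := by omega
    rw [htn]
    simp
    have hmx : (max O 0 + 2).toNat = O.toNat + 2 := by omega
    rw [hmx]

-- ===== VERDICT (by name: the statement is the Claim_ definition above) =====
theorem extract_inline_math_blocks_py_spec : Claim_equal_extract_inline_math_blocks_py := by
  intro text _
  unfold Spec_extract_inline_math_blocks_py extract_inline_math_blocks_py extract_inline_math_blocks_py_alt
  simpa using pvMain text.toList [] 0 (by omega)
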